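-- pv_equiv track=rewrite | github.com/Audino5658/CodePractice-Python | Others/CheckSortArray.py | check
-- ===== SOURCE A (Python) =====
-- def check(nums: list[int]) -> bool:
--     length = len(nums)
--     is_sorted = True
--
--     # Check whether is sorted
--     for i in range(1, length):
--         if (nums[i-1] > nums[i]):
--             is_sorted = False
--             break
--
--     if is_sorted:
--         return True
--
--     # Check whether can be rotated
--     if nums[-1] > nums[0]:
--         return False
--
--     turningpoint = False
--     for i in range(0, length):
--         if i != 0:
--             if not turningpoint:
--                 if nums[i-1] > nums[i]:
--                     turningpoint = True
--             else:
--                 if nums[i-1] > nums[i]: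
--                     return False
--
--
--     return True
-- ===== SOURCE B (Python) =====
-- def check(nums: list[int]) -> bool:
--     # one pass: count descents over the cyclic adjacency pairs (incl. last->first wrap)
--     return sum(a > b for a, b in zip(nums, nums[1:] + nums[:1])) <= 1
-- ===== Notes on version B (the rewrite author's own statement) =====
-- stated objective: simpler
-- what changed: Replaced A's three-stage control flow (early-exit sorted scan, wrap guard on nums[-1]>nums[0], turning-point scan with a flag) by a single unified count of descents over the cyclic adjacency pairs, returning count <= 1.
import Mathlib
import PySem

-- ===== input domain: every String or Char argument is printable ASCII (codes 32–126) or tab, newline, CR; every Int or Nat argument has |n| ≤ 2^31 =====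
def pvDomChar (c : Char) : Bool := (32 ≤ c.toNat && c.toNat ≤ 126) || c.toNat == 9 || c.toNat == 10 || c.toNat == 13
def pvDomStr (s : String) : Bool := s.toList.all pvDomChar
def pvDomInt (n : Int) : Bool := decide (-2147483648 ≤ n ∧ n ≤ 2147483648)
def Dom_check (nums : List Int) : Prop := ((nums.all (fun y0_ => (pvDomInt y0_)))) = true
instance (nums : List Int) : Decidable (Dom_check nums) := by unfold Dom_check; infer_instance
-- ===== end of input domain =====

-- B replaces A's three-stage early-return control flow by one unified count of cyclic
-- adjacency descents compared with 1 (objective: simpler; same O(n) cost).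

-- ===== PORT A =====
-- 'for i in range(1, length): if nums[i-1] > nums[i]: is_sorted = False; break'
-- ported as structural recursion carrying the previous element (same comparisons in order)
def aSortedLoop : Int → List Int → Bool
  | _, [] => true
  | prev, x :: rest => if prev > x then false else aSortedLoop x rest

-- the second loop: 'turningpoint' flag, early return False on a second descent
def aTurnLoop : Bool → Int → List Int → Bool
  | _, _, [] => true
  | tp, prev, x :: rest =>
    if !tp then
      if prev > x then aTurnLoop true x rest else aTurnLoop tp x rest
    else
      if prev > x then false else aTurnLoop tp x rest

def check (nums : List Int) : Bool :=
  match nums with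
  | [] => true            -- empty: range(1,0) empty, is_sorted stays True
  | h :: t =>
    if aSortedLoop h t then true
    else if t.getLastD h > h then false   -- nums[-1] > nums[0] (nonempty here)
    else aTurnLoop false h t

-- ===== PORT B =====
-- Source B: sum(a > b for a, b in zip(nums, nums[1:] + nums[:1])) <= 1
-- nums[1:] = drop 1 and nums[:1] = take 1 (exact for these nonnegative slice bounds)
def check_alt (nums : List Int) : Bool :=
  decide ((nums.zip (nums.drop 1 ++ nums.take 1)).countP (fun p => decide (p.1 > p.2)) ≤ 1)

-- ===== PRECONDITION & SPEC =====
def Spec_check (nums : List Int) (out : Bool) : Prop := out = check_alt nums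
instance (nums : List Int) (out : Bool) : Decidable (Spec_check nums out) := by unfold Spec_check; infer_instance

-- ===== CLAIM (what is proved, stated in full; the proofs are below) =====
def Claim_equal_check : Prop := ∀ (nums : List Int), Dom_check nums → Spec_check nums (check nums)

-- ===== LEMMAS AND PROOFS =====

-- descent count over the (non-cyclic) adjacent pairs of h :: t
def descCount (h : Int) (t : List Int) : Nat :=
  ((h :: t).zip t).countP (fun p => decide (p.1 > p.2))

theorem descCount_nil (h : Int) : descCount h [] = 0 := rfl

theorem descCount_cons (h x : Int) (t : List Int) :
    descCount h (x :: t) = (if h > x then 1 else 0) + descCount x t := by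
  simp only [descCount, List.zip_cons_cons, List.countP_cons, decide_eq_true_eq]
  split_ifs with h1 <;> omega

theorem zip_rot (h w : Int) (t : List Int) :
    (h :: t).zip (t ++ [w]) = (h :: t).zip t ++ [(t.getLastD h, w)] := by
  induction t generalizing h with
  | nil => rfl
  | cons x t ih =>
    simp only [List.zip_cons_cons, List.cons_append, ih x, List.getLastD_cons]

theorem aSortedLoop_iff (h : Int) (t : List Int) :
    aSortedLoop h t = true ↔ descCount h t = 0 := by
  induction t generalizing h with
  | nil => simp [aSortedLoop, descCount_nil]
  | cons x t ih =>
    rw [descCount_cons]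
    by_cases hx : h > x <;> simp [aSortedLoop, hx, ih]

theorem aTurnLoop_eq (tp : Bool) (h : Int) (t : List Int) :
    aTurnLoop tp h t = decide (descCount h t + (if tp then 1 else 0) ≤ 1) := by
  induction t generalizing h tp with
  | nil => cases tp <;> simp [aTurnLoop, descCount_nil]
  | cons x t ih =>
    rw [descCount_cons]
    cases tp <;> by_cases hx : h > x <;>
      simp [aTurnLoop, hx, ih, descCount_cons] <;> omega

theorem check_alt_cons (h : Int) (t : List Int) :
    check_alt (h :: t)
      = decide (descCount h t + (if t.getLastD h > h then 1 else 0) ≤ 1) := by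
  have hx : List.countP (fun p => decide (p.1 > p.2)) [(t.getLastD h, h)]
      = (if t.getLastD h > h then 1 else 0) := by
    simp [List.countP_cons]
  unfold check_alt descCount
  rw [show ((h :: t).drop 1 ++ (h :: t).take 1) = t ++ [h] by simp, zip_rot,
    List.countP_append, hx]

theorem check_cons (h : Int) (t : List Int) :
    check (h :: t) = (if aSortedLoop h t then true
      else if t.getLastD h > h then false else aTurnLoop false h t) := rfl

-- ===== VERDICT (by name: the statement is the Claim_ definition above) =====
theorem check_spec : Claim_equal_check := by
  intro nums _
  unfold Spec_check
  match nums with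
  | [] => rfl
  | h :: t =>
    rw [check_alt_cons, check_cons]
    by_cases hs : aSortedLoop h t = true
    · have hd0 : descCount h t = 0 := (aSortedLoop_iff h t).mp hs
      rw [if_pos hs, hd0]
      split_ifs <;> simp
    · have hd : descCount h t ≠ 0 := by
        intro h0; exact hs ((aSortedLoop_iff h t).mpr h0)
      rw [if_neg hs]
      by_cases hw : t.getLastD h > h
      · rw [if_pos hw, if_pos hw]
        have h1 : ¬ (descCount h t + 1 ≤ 1) := by omega
        simp [h1]
      · rw [if_neg hw, if_neg hw, aTurnLoop_eq]; simp
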